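-- pv_equiv track=rewrite | github.com/pypi-data/pypi-mirror-399 | packages/comfygit-core/comfygit_core-0.3.11-py3-none-any.whl/comfygit_core/utils/dependency_parser.py | find_most_restrictive_constraint
-- ===== SOURCE A (Python) =====
-- def find_most_restrictive_constraint(constraints: list[str]) -> str | None:
--     """Find the most restrictive version constraint from a list.
--
--     Priority: exact pins > upper bounds > ranges > lower bounds > unconstrained
--
--     Args:
--         constraints: List of version constraints
--
--     Returns:
--         The most restrictive constraint or None
--     """
--     if not constraints:
--         return None
--
--     # Filter out None values
--     valid_constraints = [c for c in constraints if c]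
--     if not valid_constraints:
--         return None
--
--     # Look for exact pins first
--     for constraint in valid_constraints:
--         if "==" in constraint:
--             return constraint
--
--     # Look for upper bounds or ranges
--     for constraint in valid_constraints:
--         if "<" in constraint or "," in constraint:
--             return constraint
--
--     # Return any constraint (likely lower bounds)
--     return valid_constraints[0]
-- ===== SOURCE B (Python) =====
-- def find_most_restrictive_constraint(constraints: list[str]) -> str | None:
--     """One pass: remember the first pin, first bound/range, and first other
--     valid constraint, then return them in priority order."""
--     pin = bound = fallback = None
--     for c in constraints:
--         if not c:
--             continue
--         if "==" in c:
--             if pin is None: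
--                 pin = c
--         elif "<" in c or "," in c:
--             if bound is None:
--                 bound = c
--         elif fallback is None:
--             fallback = c
--     if pin is not None:
--         return pin
--     if bound is not None:
--         return bound
--     return fallback
-- ===== Notes on version B (the rewrite author's own statement) =====
-- stated objective: alternative
-- what changed: Replaces the filter plus three sequential scans with a single pass that records the first constraint of each priority tier (pin, bound/range, other) and returns them in priority order.
import Mathlib
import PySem

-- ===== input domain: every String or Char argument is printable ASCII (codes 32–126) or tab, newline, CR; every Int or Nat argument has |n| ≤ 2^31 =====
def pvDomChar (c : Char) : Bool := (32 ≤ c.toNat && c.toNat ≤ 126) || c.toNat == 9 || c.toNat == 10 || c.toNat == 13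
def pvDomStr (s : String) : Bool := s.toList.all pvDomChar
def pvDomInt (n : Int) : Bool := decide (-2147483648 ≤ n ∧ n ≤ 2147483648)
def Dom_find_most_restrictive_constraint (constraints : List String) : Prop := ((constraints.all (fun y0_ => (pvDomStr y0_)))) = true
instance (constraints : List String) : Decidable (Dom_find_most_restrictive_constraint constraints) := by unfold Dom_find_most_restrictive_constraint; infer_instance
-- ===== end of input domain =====

-- B replaces A's filter + three sequential scans by one pass that records the first
-- constraint of each priority tier (pin / bound-or-range / other) — alternative decomposition, same cost.


-- ===== PORT A =====
-- 'if not constraints: return None; valid = [c for c in constraints if c];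
--  if not valid: return None; scan for "==", scan for "<" or ","; return valid[0]'
def find_most_restrictive_constraint (constraints : List String) : Option String :=
  if constraints = [] then none
  else
    let valid := constraints.filter (fun c => c ≠ "")
    if valid = [] then none
    else
      match valid.find? (fun c => PySem.Str.isIn "==" c) with
      | some c => some c
      | none =>
        match valid.find? (fun c => PySem.Str.isIn "<" c || PySem.Str.isIn "," c) with
        | some c => some c
        | none => valid.head?

-- ===== PORT B =====
-- 'x if x is not None else y' for the slot updates and the final priority choice
def fmrcOr (x y : Option String) : Option String :=
  match x with
  | some v => some v
  | none => y

-- the loop body: skip falsy c, then set the slot of c's tier if still unset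
def fmrcStep (st : Option String × Option String × Option String) (c : String) :
    Option String × Option String × Option String :=
  if c = "" then st
  else if PySem.Str.isIn "==" c then (fmrcOr st.1 (some c), st.2.1, st.2.2)
  else if PySem.Str.isIn "<" c || PySem.Str.isIn "," c then (st.1, fmrcOr st.2.1 (some c), st.2.2)
  else (st.1, st.2.1, fmrcOr st.2.2 (some c))

def find_most_restrictive_constraint_alt (constraints : List String) : Option String :=
  let r := constraints.foldl fmrcStep (none, none, none)
  fmrcOr r.1 (fmrcOr r.2.1 r.2.2)

-- ===== PRECONDITION & SPEC =====
def Spec_find_most_restrictive_constraint (constraints : List String) (out : Option String) : Prop := out = find_most_restrictive_constraint_alt constraints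
instance (constraints : List String) (out : Option String) : Decidable (Spec_find_most_restrictive_constraint constraints out) := by unfold Spec_find_most_restrictive_constraint; infer_instance

-- ===== CLAIM (what is proved, stated in full; the proofs are below) =====
def Claim_equal_find_most_restrictive_constraint : Prop := ∀ (constraints : List String), Dom_find_most_restrictive_constraint constraints → Spec_find_most_restrictive_constraint constraints (find_most_restrictive_constraint constraints)

-- ===== LEMMAS AND PROOFS =====

theorem fmrcOr_some (v : String) (y : Option String) : fmrcOr (some v) y = some v := rfl
theorem fmrcOr_assoc (x y z : Option String) :
    fmrcOr (fmrcOr x y) z = fmrcOr x (fmrcOr y z) := by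
  cases x <;> cases y <;> rfl

-- the fold computes, per component, 'initial slot, else first matching valid constraint'
theorem fmrc_foldl_char (l : List String) (p b f : Option String) :
    l.foldl fmrcStep (p, b, f) =
      ( fmrcOr p ((l.filter (fun c => c ≠ "")).find? (fun c => PySem.Str.isIn "==" c))
      , fmrcOr b ((l.filter (fun c => c ≠ "")).find?
          (fun c => !PySem.Str.isIn "==" c && (PySem.Str.isIn "<" c || PySem.Str.isIn "," c)))
      , fmrcOr f ((l.filter (fun c => c ≠ "")).find?
          (fun c => !PySem.Str.isIn "==" c && !(PySem.Str.isIn "<" c || PySem.Str.isIn "," c))) ) := by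
  induction l generalizing p b f with
  | nil =>
    simp only [List.foldl_nil, List.filter_nil, List.find?_nil]
    cases p <;> cases b <;> cases f <;> rfl
  | cons c t ih =>
    rw [List.foldl_cons, List.filter_cons]
    by_cases hc : c = ""
    · rw [if_neg (by simp [hc]), fmrcStep, if_pos hc, ih]
    · rw [if_pos (decide_eq_true hc), fmrcStep, if_neg hc]
      by_cases hp : PySem.Str.isIn "==" c
      · rw [if_pos hp, ih,
            List.find?_cons_of_pos (p := fun c => PySem.Str.isIn "==" c) hp,
            List.find?_cons_of_neg (by simp only [hp, Bool.not_true, Bool.false_and]; simp),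
            List.find?_cons_of_neg (by simp only [hp, Bool.not_true, Bool.false_and]; simp),
            fmrcOr_assoc, fmrcOr_some]
      · have hp' : PySem.Str.isIn "==" c = false := Bool.eq_false_iff.mpr hp
        by_cases hb : (PySem.Str.isIn "<" c || PySem.Str.isIn "," c) = true
        · rw [if_neg hp, if_pos hb, ih,
              List.find?_cons_of_neg (by simp only [hp']; simp),
              List.find?_cons_of_pos
                (by simp only [hp', Bool.not_false, Bool.true_and]; exact hb),
              List.find?_cons_of_neg
                (by simp only [hp', Bool.not_false, Bool.true_and, hb, Bool.not_true]; simp),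
              fmrcOr_assoc, fmrcOr_some]
        · have hb' : (PySem.Str.isIn "<" c || PySem.Str.isIn "," c) = false :=
            Bool.eq_false_iff.mpr hb
          rw [if_neg hp, if_neg hb, ih,
              List.find?_cons_of_neg (by simp only [hp']; simp),
              List.find?_cons_of_neg
                (by simp only [hp', Bool.not_false, Bool.true_and, hb']; simp),
              List.find?_cons_of_pos
                (by simp only [hp', hb', Bool.not_false, Bool.true_and]),
              fmrcOr_assoc, fmrcOr_some]

theorem fmrc_find?_congr {l : List String} {p q : String → Bool}
    (h : ∀ x ∈ l, p x = q x) : l.find? p = l.find? q := by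
  induction l with
  | nil => rfl
  | cons a t ih =>
    have ha := h a List.mem_cons_self
    by_cases hpa : p a = true
    · rw [List.find?_cons_of_pos hpa, List.find?_cons_of_pos (ha ▸ hpa)]
    · rw [List.find?_cons_of_neg hpa,
          List.find?_cons_of_neg (by rw [← ha]; exact hpa)]
      exact ih (fun x hx => h x (List.mem_cons_of_mem _ hx))

theorem fmrc_find?_all_pos {l : List String} {p : String → Bool}
    (h : ∀ x ∈ l, p x = true) : l.find? p = l.head? := by
  cases l with
  | nil => rfl
  | cons a t => rw [List.find?_cons_of_pos (h a List.mem_cons_self)]; rfl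

-- ===== VERDICT (by name: the statement is the Claim_ definition above) =====
theorem find_most_restrictive_constraint_spec : Claim_equal_find_most_restrictive_constraint := by
  intro cs _
  unfold Spec_find_most_restrictive_constraint
  unfold find_most_restrictive_constraint find_most_restrictive_constraint_alt
  rw [fmrc_foldl_char]
  by_cases hcs : cs = []
  · subst hcs; rfl
  · rw [if_neg hcs]
    by_cases hval : cs.filter (fun c => c ≠ "") = []
    · rw [hval]; rfl
    · rw [if_neg hval]
      rcases h1 : (cs.filter (fun c => c ≠ "")).find? (fun c => PySem.Str.isIn "==" c)
          with _ | c1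
      · have hnopin : ∀ x ∈ cs.filter (fun c => c ≠ ""), PySem.Str.isIn "==" x = false :=
          fun x hx => Bool.eq_false_iff.mpr (List.find?_eq_none.mp h1 x hx)
        have e2 : (cs.filter (fun c => c ≠ "")).find?
            (fun c => !PySem.Str.isIn "==" c && (PySem.Str.isIn "<" c || PySem.Str.isIn "," c))
            = (cs.filter (fun c => c ≠ "")).find?
                (fun c => PySem.Str.isIn "<" c || PySem.Str.isIn "," c) :=
          fmrc_find?_congr (fun x hx => by
            simp only [hnopin x hx, Bool.not_false, Bool.true_and])
        rcases h2 : (cs.filter (fun c => c ≠ "")).find?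
            (fun c => PySem.Str.isIn "<" c || PySem.Str.isIn "," c) with _ | c2
        · have hnobd : ∀ x ∈ cs.filter (fun c => c ≠ ""),
              (PySem.Str.isIn "<" x || PySem.Str.isIn "," x) = false :=
            fun x hx => Bool.eq_false_iff.mpr (List.find?_eq_none.mp h2 x hx)
          have e3 : (cs.filter (fun c => c ≠ "")).find?
              (fun c => !PySem.Str.isIn "==" c && !(PySem.Str.isIn "<" c || PySem.Str.isIn "," c))
              = (cs.filter (fun c => c ≠ "")).head? :=
            fmrc_find?_all_pos (fun x hx => by
              simp only [hnopin x hx, hnobd x hx, Bool.not_false, Bool.true_and])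
          rw [e2, h2, e3]
          rfl
        · rw [e2, h2]
          rfl
      · rfl
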